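-- pv_equiv track=rewrite | github.com/tanasovich/hillel-python-intro | lesson10/treangle_sequence.py | count_first
-- ===== SOURCE A (Python) =====
-- def count_first(nums, n: int) -> list:
--     def a(k: int) -> int:
--         if k == 1:
--             return 1
--         return a(k - a(k - 1)) + 1
--
--     sequence = list()
--
--     for i in range(1, n + 1):
--         sequence.append(a(i))
--
--     return sequence
-- ===== SOURCE B (Python) =====
-- def count_first(nums, n: int) -> list:
--     sequence = []
--     for _ in range(n):
--         if not sequence:
--             sequence.append(1)
--         else:
--             sequence.append(sequence[len(sequence) - sequence[-1]] + 1)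
--     return sequence
-- ===== Notes on version B (the rewrite author's own statement) =====
-- stated objective: faster
-- what changed: Replaces the memo-less nested recursion a(k)=a(k-a(k-1))+1 (recomputed from scratch for every k) with a single bottom-up pass that appends each term computed from the already-built prefix.
import Mathlib
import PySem

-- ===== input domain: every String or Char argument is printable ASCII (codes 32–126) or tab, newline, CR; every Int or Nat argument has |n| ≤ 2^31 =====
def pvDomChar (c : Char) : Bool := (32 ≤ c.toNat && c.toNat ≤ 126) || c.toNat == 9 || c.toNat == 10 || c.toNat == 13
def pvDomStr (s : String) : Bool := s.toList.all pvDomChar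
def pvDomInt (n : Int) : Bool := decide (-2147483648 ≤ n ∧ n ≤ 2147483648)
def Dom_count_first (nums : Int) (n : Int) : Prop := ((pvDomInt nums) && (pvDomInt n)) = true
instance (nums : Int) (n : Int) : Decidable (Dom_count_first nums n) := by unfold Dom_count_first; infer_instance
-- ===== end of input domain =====

-- B replaces A's memo-less nested recursion (exponential recomputation) with one
-- bottom-up pass that reads each new term off the already-built prefix (O(n)).

-- ===== PORT A =====
-- inner 'def a(k)': the recursion a(k) = a(k - a(k-1)) + 1 is not structurally
-- decreasing, so it carries a fuel counter; fuel i.toNat suffices for every call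
-- count_first makes (proved in pvAF_eq below), so the guard never fires on A's runs.
def pvAF : Nat → Int → Option Int
  | 0, _ => none
  | f + 1, k =>
    if k = 1 then some 1
    else
      match pvAF f (k - 1) with
      | none => none
      | some v =>
        match pvAF f (k - v) with
        | none => none
        | some w => some (w + 1)

def count_first (nums : Int) (n : Int) : List Int :=
  (PySem.List.pyRange 1 (n + 1) 1).foldl
    (fun sequence i => sequence ++ [(pvAF i.toNat i).getD 0]) []

-- ===== PORT B =====
-- loop body of Source B; the pyGetD indices are provably in range on every iteration
def pvStep (sequence : List Int) : List Int :=
  if sequence = [] then sequence ++ [1]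
  else sequence ++
    [PySem.List.pyGetD sequence
       ((sequence.length : Int) - PySem.List.pyGetD sequence (-1) 0) 0 + 1]

def count_first_alt (nums : Int) (n : Int) : List Int :=
  (PySem.List.pyRange 0 n 1).foldl (fun sequence _ => pvStep sequence) []

-- ===== PRECONDITION & SPEC =====
def Spec_count_first (nums : Int) (n : Int) (out : List Int) : Prop := out = count_first_alt nums n
instance (nums : Int) (n : Int) (out : List Int) : Decidable (Spec_count_first nums n out) := by unfold Spec_count_first; infer_instance

-- ===== CLAIM (what is proved, stated in full; the proofs are below) =====
def Claim_equal_count_first : Prop := ∀ (nums : Int) (n : Int), Dom_count_first nums n → Spec_count_first nums n (count_first nums n)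

-- ===== LEMMAS AND PROOFS =====

-- the state of B's loop after m iterations
def pvS (m : Nat) : List Int := pvStep^[m] []

-- the k-th term of the sequence (k ≥ 1), read off B's loop state
def pvV (k : Nat) : Int := (pvS k).getD (k - 1) 0

theorem pvStep_length (s : List Int) : (pvStep s).length = s.length + 1 := by
  unfold pvStep; split <;> simp

theorem pvS_length (m : Nat) : (pvS m).length = m := by
  induction m with
  | zero => rfl
  | succ m ih => rw [pvS, Function.iterate_succ_apply', ← pvS, pvStep_length, ih]

theorem pvStep_eq_append (s : List Int) : ∃ x : Int, pvStep s = s ++ [x] := by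
  unfold pvStep; split
  · exact ⟨1, rfl⟩
  · exact ⟨_, rfl⟩

theorem pvS_succ (m : Nat) : pvS (m + 1) = pvS m ++ [pvV (m + 1)] := by
  obtain ⟨x, hx⟩ := pvStep_eq_append (pvS m)
  have hstep : pvS (m + 1) = pvStep (pvS m) := by
    rw [pvS, Function.iterate_succ_apply']; rfl
  have hv : pvV (m + 1) = x := by
    unfold pvV
    rw [hstep, hx]
    simp [List.getD, pvS_length]
  rw [hstep, hx, hv]

theorem pvV_getD (m k : Nat) (h : k < m) : (pvS m).getD k 0 = pvV (k + 1) := by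
  induction m with
  | zero => omega
  | succ m ih =>
    rw [pvS_succ]
    rcases Nat.lt_or_ge k m with hk | hk
    · rw [List.getD_append _ _ _ _ (by rw [pvS_length]; omega)]
      exact ih hk
    · have hkm : k = m := by omega
      subst hkm
      unfold pvV
      simp [List.getD, pvS_length]

theorem pvV_one : pvV 1 = 1 := by decide

theorem pvInv (k : Nat) (hk : 1 ≤ k) :
    1 ≤ pvV k ∧ pvV k ≤ (k : Int) ∧
      (2 ≤ k → pvV k = pvV (k - (pvV (k - 1)).toNat) + 1) := by
  induction k using Nat.strong_induction_on with
  | _ k ih =>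
  rcases Nat.lt_or_ge k 2 with hk2 | hk2
  · have : k = 1 := by omega
    subst this
    refine ⟨by rw [pvV_one], by rw [pvV_one]; norm_num, by omega⟩
  · -- k ≥ 2: unfold one step of B's loop
    have hne : pvS (k - 1) ≠ [] := by
      intro h
      have := pvS_length (k - 1)
      rw [h] at this
      simp at this
      omega
    have hstep : pvS k = pvStep (pvS (k - 1)) := by
      have : k = (k - 1) + 1 := by omega
      rw [this, pvS, Function.iterate_succ_apply']; rfl
    -- the last element of the prefix is pvV (k-1)
    have hlast : PySem.List.pyGetD (pvS (k - 1)) (-1) 0 = pvV (k - 1) := by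
      rw [PySem.List.pyGetD_neg_one (pvS (k - 1)) 0 hne]
      have hlen : 0 < (pvS (k - 1)).length := List.length_pos_of_ne_nil hne
      rw [List.getLast_eq_getElem]
      have := pvV_getD (k - 1) ((pvS (k - 1)).length - 1) (by rw [pvS_length] at *; omega)
      rw [List.getD_eq_getElem _ _ (by omega)] at this
      rw [this, pvS_length]
      congr 1
      omega
    have hprev := ih (k - 1) (by omega) (by omega)
    obtain ⟨hp1, hp2, -⟩ := hprev
    set p : Int := pvV (k - 1) with hp
    -- the index read is in range and names pvV (k - p)
    have hidx : ((pvS (k - 1)).length : Int) - p = ((k - 1 - p.toNat : Nat) : Int) := by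
      rw [pvS_length]
      omega
    have hread : PySem.List.pyGetD (pvS (k - 1)) (((pvS (k - 1)).length : Int) - p) 0
        = pvV (k - p.toNat) := by
      rw [hidx, PySem.List.pyGetD_natCast]
      have h1 : k - 1 - p.toNat < k - 1 := by omega
      rw [pvV_getD (k - 1) (k - 1 - p.toNat) h1]
      congr 1
      omega
    have hValk : pvV k = pvV (k - p.toNat) + 1 := by
      unfold pvV
      rw [hstep]
      unfold pvStep
      rw [if_neg hne, hlast, hread]
      have hl : (pvS (k - 1)).length = k - 1 := pvS_length _
      rw [List.getD_eq_getElem?_getD, List.getElem?_append_right (by omega)]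
      simp [hl, pvV, List.getD_eq_getElem?_getD]
    have hj1 : 1 ≤ k - p.toNat := by omega
    have hj2 : k - p.toNat ≤ k - 1 := by omega
    obtain ⟨hq1, hq2, -⟩ := ih (k - p.toNat) (by omega) hj1
    refine ⟨?_, ?_, fun _ => hValk⟩
    · rw [hValk]; omega
    · rw [hValk]
      have : ((k - p.toNat : Nat) : Int) ≤ (k : Int) - 1 := by omega
      omega

theorem pvAF_eq (f : Nat) : ∀ k : Nat, 1 ≤ k → k ≤ f → pvAF f (k : Int) = some (pvV k) := by
  induction f with
  | zero => intro k h1 h2; omega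
  | succ f ihf =>
    intro k h1 h2
    rcases Nat.lt_or_ge k 2 with hk2 | hk2
    · have : k = 1 := by omega
      subst this
      simp [pvAF, pvV_one]
    · have hknot1 : (k : Int) ≠ 1 := by omega
      rw [pvAF, if_neg hknot1]
      have h1' : (k : Int) - 1 = ((k - 1 : Nat) : Int) := by omega
      rw [h1', ihf (k - 1) (by omega) (by omega)]
      obtain ⟨hp1, hp2, -⟩ := pvInv (k - 1) (by omega)
      set p : Int := pvV (k - 1) with hp
      have h2' : (k : Int) - p = ((k - p.toNat : Nat) : Int) := by omega
      dsimp only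
      rw [h2', ihf (k - p.toNat) (by omega) (by omega)]
      dsimp only
      obtain ⟨-, -, hrec⟩ := pvInv k (by omega)
      rw [hrec hk2]

theorem pvA_eq_pvS (m : Nat) :
    (PySem.List.pyRange 1 ((m : Int) + 1) 1).foldl
      (fun sequence i => sequence ++ [(pvAF i.toNat i).getD 0]) [] = pvS m := by
  induction m with
  | zero => rw [PySem.List.pyRange_one_eq_nil (by norm_num)]; rfl
  | succ m ih =>
    have hsplit : PySem.List.pyRange 1 (((m + 1 : Nat) : Int) + 1) 1
        = PySem.List.pyRange 1 ((m : Int) + 1) 1 ++ [((m : Int) + 1)] := by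
      have : ((m + 1 : Nat) : Int) + 1 = ((m : Int) + 1) + 1 := by omega
      rw [this, PySem.List.pyRange_one_succ_right (by omega)]
    rw [hsplit, List.foldl_append, ih]
    simp only [List.foldl_cons, List.foldl_nil]
    have hcast : ((m : Int) + 1) = ((m + 1 : Nat) : Int) := by omega
    rw [hcast, Int.toNat_natCast, pvAF_eq (m + 1) (m + 1) (by omega) (by omega)]
    rw [pvS_succ]
    rfl

theorem pvFoldl_const {α β : Type} (f : α → α) (l : List β) (init : α) :
    l.foldl (fun s _ => f s) init = f^[l.length] init := by
  induction l generalizing init with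
  | nil => rfl
  | cons x xs ih => simp [List.foldl_cons, ih, Function.iterate_succ_apply]

-- ===== VERDICT (by name: the statement is the Claim_ definition above) =====
theorem count_first_spec : Claim_equal_count_first := by
  intro nums n _
  unfold Spec_count_first count_first count_first_alt
  rw [pvFoldl_const, PySem.List.length_pyRange_one]
  show _ = pvS ((n - 0).toNat)
  by_cases hn : n ≤ 0
  · rw [PySem.List.pyRange_one_eq_nil (by omega)]
    have : (n - 0).toNat = 0 := by omega
    rw [this]; rfl
  · have : ((n.toNat : Int) + 1) = n + 1 := by omega
    rw [← this, pvA_eq_pvS]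
    congr 1
    omega
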